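-- pv_equiv track=rewrite | github.com/Greykoil/AdventOfCode2017 | Day2.py | part_one
-- ===== SOURCE A (Python) =====
-- def part_one(grid):
-- #
-- #-----------------------------------------------------------------------------
--
--     checksum = 0
--     for row in grid:
--         highest = max(row)
--         lowest = min(row)
--         diff = highest - lowest
--         checksum += diff;
--     return checksum
-- ===== SOURCE B (Python) =====
-- def part_one(grid):
--     return sum(r[-1] - r[0] for r in map(sorted, grid))
-- ===== Notes on version B (the rewrite author's own statement) =====
-- stated objective: alternative
-- what changed: Instead of scanning each row for max and min, B sorts every row and sums last-minus-first over the sorted rows in a single generator expression.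
-- outside the precondition, e.g. on part_one([[]]): A raises ValueError, B raises IndexError
import Mathlib
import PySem

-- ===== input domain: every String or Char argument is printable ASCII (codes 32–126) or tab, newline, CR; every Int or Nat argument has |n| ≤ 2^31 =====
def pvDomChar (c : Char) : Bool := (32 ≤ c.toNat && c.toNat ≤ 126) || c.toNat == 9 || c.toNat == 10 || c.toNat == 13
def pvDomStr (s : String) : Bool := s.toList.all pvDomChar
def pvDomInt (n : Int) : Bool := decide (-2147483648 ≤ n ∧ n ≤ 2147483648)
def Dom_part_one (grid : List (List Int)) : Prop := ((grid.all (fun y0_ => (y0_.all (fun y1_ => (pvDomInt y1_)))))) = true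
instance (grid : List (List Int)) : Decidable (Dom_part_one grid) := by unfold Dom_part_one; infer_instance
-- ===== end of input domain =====

-- B sorts each row and sums last-minus-first over the sorted rows (alternative algorithm; not claimed faster).

-- ===== PORT A =====
def part_one (grid : List (List Int)) : Int :=
  grid.foldl (fun checksum row =>
    let highest := (PySem.List.max? row (fun y => y)).getD 0
    let lowest := (PySem.List.min? row (fun y => y)).getD 0
    checksum + (highest - lowest)) 0

-- ===== PORT B =====
def part_one_alt (grid : List (List Int)) : Int :=
  (grid.map (fun row => PySem.List.sorted row (fun y => y) false)).foldl
    (fun acc r => acc + ((PySem.List.pyGet? r (-1)).getD 0 - (PySem.List.pyGet? r 0).getD 0)) 0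

-- ===== PRECONDITION & SPEC =====
-- Pre_ excludes grids containing an empty row: there A's max([]) raises ValueError (and B's r[-1] raises IndexError).
def Pre_part_one (grid : List (List Int)) : Prop := ∀ row ∈ grid, row ≠ []
instance (grid : List (List Int)) : Decidable (Pre_part_one grid) := by unfold Pre_part_one; infer_instance
def pvWitness_part_one : List (List Int) := [[5, 1, 9, 5], [7, 5, 3], [2, 4, 6, 8]]

def Spec_part_one (grid : List (List Int)) (out : Int) : Prop := out = part_one_alt grid
instance (grid : List (List Int)) (out : Int) : Decidable (Spec_part_one grid out) := by unfold Spec_part_one; infer_instance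

-- ===== CLAIM (what is proved, stated in full; the proofs are below) =====
def Claim_equal_part_one : Prop := ∀ (grid : List (List Int)), Dom_part_one grid → Pre_part_one grid → Spec_part_one grid (part_one grid)

-- ===== LEMMAS AND PROOFS =====

theorem foldl_min_mem (t : List Int) : ∀ h : Int, t.foldl min h ∈ h :: t := by
  induction t with
  | nil => intro h; simp
  | cons x t ih =>
    intro h
    simp only [List.foldl_cons]
    rcases List.mem_cons.mp (ih (min h x)) with he | hm
    · rw [he]; rcases min_choice h x with hc | hc <;> simp [hc]
    · exact List.mem_cons_of_mem _ (List.mem_cons_of_mem _ hm)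

theorem foldl_min_le (t : List Int) : ∀ h y : Int, y ∈ h :: t → t.foldl min h ≤ y := by
  induction t with
  | nil => intro h y hy; simp at hy; simp [hy]
  | cons x t ih =>
    intro h y hy
    simp only [List.foldl_cons]
    have hinit : List.foldl min (min h x) t ≤ min h x := ih (min h x) _ List.mem_cons_self
    simp only [List.mem_cons] at hy
    rcases hy with he | he | hm
    · exact le_trans hinit (le_trans (min_le_left _ _) (le_of_eq he.symm))
    · exact le_trans hinit (le_trans (min_le_right _ _) (le_of_eq he.symm))
    · exact ih (min h x) y (List.mem_cons_of_mem _ hm)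

theorem foldl_max_mem (t : List Int) : ∀ h : Int, t.foldl max h ∈ h :: t := by
  induction t with
  | nil => intro h; simp
  | cons x t ih =>
    intro h
    simp only [List.foldl_cons]
    rcases List.mem_cons.mp (ih (max h x)) with he | hm
    · rw [he]; rcases max_choice h x with hc | hc <;> simp [hc]
    · exact List.mem_cons_of_mem _ (List.mem_cons_of_mem _ hm)

theorem foldl_max_ge (t : List Int) : ∀ h y : Int, y ∈ h :: t → y ≤ t.foldl max h := by
  induction t with
  | nil => intro h y hy; simp at hy; simp [hy]
  | cons x t ih =>
    intro h y hy
    simp only [List.foldl_cons]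
    have hinit : max h x ≤ List.foldl max (max h x) t := ih (max h x) _ List.mem_cons_self
    simp only [List.mem_cons] at hy
    rcases hy with he | he | hm
    · exact le_trans (le_of_eq he) (le_trans (le_max_left _ _) hinit)
    · exact le_trans (le_of_eq he) (le_trans (le_max_right _ _) hinit)
    · exact ih (max h x) y (List.mem_cons_of_mem _ hm)

theorem pairwise_le_getLast : ∀ (l : List Int) (hne : l ≠ []),
    l.Pairwise (· ≤ ·) → ∀ y ∈ l, y ≤ l.getLast hne := by
  intro l
  induction l with
  | nil => intro hne; exact absurd rfl hne
  | cons a t ih =>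
    intro _ hp y hy
    cases t with
    | nil => simp at hy; simp [List.getLast, hy]
    | cons b u =>
      rw [List.getLast_cons (by simp)]
      rcases List.mem_cons.mp hy with rfl | hy'
      · exact (List.pairwise_cons.mp hp).1 _ (List.getLast_mem _)
      · exact ih (by simp) (List.pairwise_cons.mp hp).2 y hy'

theorem row_eq (h : Int) (t : List Int) :
    ((PySem.List.pyGet? (PySem.List.sorted (h :: t) (fun y => y) false) (-1)).getD 0
      - (PySem.List.pyGet? (PySem.List.sorted (h :: t) (fun y => y) false) 0).getD 0)
    = t.foldl max h - t.foldl min h := by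
  have hne : PySem.List.sorted (h :: t) (fun y => y) false ≠ [] := by
    rw [Ne, PySem.List.sorted_eq_nil_iff]; simp
  rcases hs : PySem.List.sorted (h :: t) (fun y => y) false with _ | ⟨m, u⟩
  · exact absurd hs hne
  · have hmem : ∀ y : Int, y ∈ m :: u ↔ y ∈ h :: t := by
      intro y; rw [← hs]; exact PySem.List.mem_sorted (h :: t) (fun y => y) false y
    have hpw : (m :: u).Pairwise (fun a b : Int => a ≤ b) := by
      rw [← hs]; exact PySem.List.sorted_pairwise (h :: t) (fun y => y)
    have hmin : m = t.foldl min h := by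
      have h1 : m ≤ t.foldl min h :=
        PySem.List.key_head_sorted_le (h :: t) (fun y => y) hs _ (foldl_min_mem t h)
      have h2 : t.foldl min h ≤ m :=
        foldl_min_le t h m ((hmem m).mp List.mem_cons_self)
      exact le_antisymm h1 h2
    have hmax : (m :: u).getLast (by simp) = t.foldl max h := by
      have h1 : t.foldl max h ≤ (m :: u).getLast (by simp) :=
        pairwise_le_getLast _ (by simp) hpw _ ((hmem _).mpr (foldl_max_mem t h))
      have h2 : (m :: u).getLast (by simp) ≤ t.foldl max h :=
        foldl_max_ge t h _ ((hmem _).mp (List.getLast_mem _))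
      exact le_antisymm h2 h1
    rw [PySem.List.pyGet?_neg_one, PySem.List.pyGet?_zero_cons]
    rw [List.getLast?_eq_some_getLast (l := m :: u) (by simp)]
    simp only [Option.getD_some]
    rw [hmax, hmin]

theorem part_one_spec : Claim_equal_part_one := by
  intro grid _ hpre
  unfold Spec_part_one part_one part_one_alt
  rw [List.foldl_map]
  apply PySem.List.foldl_congr_mem
  intro acc row hmem
  match row with
  | [] => exact absurd rfl (hpre [] hmem)
  | h :: t =>
    simp only [PySem.List.max?_id_cons, PySem.List.min?_id_cons, Option.getD_some]
    rw [row_eq h t]
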